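-- pv_equiv track=rewrite | github.com/open2c/cooler | src/cooler/_reduce.py | preferred_sequence
-- ===== SOURCE A (Python) =====
-- from collections.abc import Iterator
-- from typing import Any, Literal
--
-- def geomprog(start: int, mul: int) -> Iterator[int]:
--     """
--     Generate a geometric progression of integers.
--
--     Beginning with integer ``start``, yield an unbounded geometric progression
--     with integer ratio ``mul``.
--
--     """
--     start, mul = int(start), int(mul)
--     yield start
--     while True:
--         start *= mul
--         yield start
--
-- def niceprog(start: int) -> Iterator[int]:
--     """
--     Generate a nice progression of integers.
--
--     Beginning with integer ``start``, yield a sequence of "nicely" spaced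
--     integers: an unbounded geometric progression with ratio 10, interspersed
--     with steps of ratios 2 and 5.
--
--     """
--     start = int(start)
--     yield start
--     while True:
--         for mul in (2, 5, 10):
--             yield start * mul
--         start *= 10
--
-- def preferred_sequence(
--     start: int,
--     stop: int,
--     style: Literal["binary", "nice"] = "nice"
-- ) -> list[int]:
--     """
--     Return a sequence of integers with a "preferred" stepping pattern.
--
--     Parameters
--     ----------
--     start : int
--         Starting value in the progression.
--     stop : int
--         Upper bound of progression, inclusive. Values will not exceed this.
--     style : {'nice', 'binary'}
--         Style of progression. 'nice' gives geometric steps of 10 with 2 and 5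
--         in between. 'binary' gives geometric steps of 2.
--
--     Returns
--     ------
--     list of int
--
--     Examples
--     --------
--     For certain values of `start` (n * 10^i), nice stepping produces familiar
--     "preferred" sequences [1]_:
--
--     Note denominations in Dollars (1-2-5)
--
--         >>> preferred_sequence(1, 100, 'nice')
--         [1, 2, 5, 10, 20, 50, 100]
--
--
--     Coin denominations in Cents
--
--         >>> preferred_sequence(5, 100, 'nice')
--         [5, 10, 25, 50, 100]
--
--     .. [1] https://en.wikipedia.org/wiki/Preferred_number#1-2-5_series
--
--     """
--     if start > stop:
--         return []
--
--     if style == "binary":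
--         gen = geomprog(start, 2)
--     elif style == "nice":
--         gen = niceprog(start)
--     else:
--         ValueError(f"Expected style value of 'binary' or 'nice'; got '{style}'.")
--
--     seq = [next(gen)]
--     while True:
--         n = next(gen)
--         if n > stop:
--             break
--         seq.append(n)
--
--     return seq
-- ===== SOURCE B (Python) =====
-- def preferred_sequence(start, stop, style="nice"):
--     if start > stop:
--         return []
--     if style == "binary":
--         q = stop // start
--         return [start << i for i in range(q.bit_length())]
--     if style == "nice":
--         out = []
--         p = 1
--         while start * p <= stop:
--             for m in (1, 2, 5):
--                 v = start * m * p
--                 if v <= stop: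
--                     out.append(v)
--             p *= 10
--         return out
--     raise ValueError(f"Expected style value of 'binary' or 'nice'; got '{style}'.")
-- ===== Notes on version B (the rewrite author's own statement) =====
-- stated objective: alternative
-- what changed: Replaced A's infinite generators consumed element-by-element with a break by a closed-form bit_length-sized shift comprehension for 'binary' and a per-decade (1,2,5)-batch filter loop for 'nice'.
import Mathlib
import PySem

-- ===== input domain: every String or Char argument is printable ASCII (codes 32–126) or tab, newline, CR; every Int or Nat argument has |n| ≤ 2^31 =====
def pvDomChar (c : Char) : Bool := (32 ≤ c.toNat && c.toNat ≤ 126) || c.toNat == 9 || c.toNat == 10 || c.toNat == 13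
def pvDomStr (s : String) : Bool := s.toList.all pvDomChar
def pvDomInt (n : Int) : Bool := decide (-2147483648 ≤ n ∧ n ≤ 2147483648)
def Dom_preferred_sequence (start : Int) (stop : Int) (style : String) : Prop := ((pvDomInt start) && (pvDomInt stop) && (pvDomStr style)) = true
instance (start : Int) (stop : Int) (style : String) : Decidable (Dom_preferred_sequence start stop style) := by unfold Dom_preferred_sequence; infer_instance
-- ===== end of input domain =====

-- B replaces A's generator-plus-break consumption with a closed-form bit_length map for
-- 'binary' and a per-decade filtered batch loop for 'nice' (objective: alternative).

-- ===== PORT A =====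
-- A consumes an infinite generator, breaking on the first value > stop; ported as
-- fuel-bounded recursion (the fuel only makes the same loop total: on Pre_ inputs it is
-- provably never exhausted).
def aBinLoop (stop : Int) (fuel : Nat) (v : Int) : List Int :=
  match fuel with
  | 0 => []
  | f + 1 =>
    let n := v * 2
    if n > stop then [] else n :: aBinLoop stop f n

def aNiceLoop (stop : Int) (fuel : Nat) (base : Int) : List Int :=
  match fuel with
  | 0 => []
  | f + 1 =>
    let n2 := base * 2
    if n2 > stop then [] else n2 ::
      (let n5 := base * 5
       if n5 > stop then [] else n5 ::
         (let n10 := base * 10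
          if n10 > stop then [] else n10 :: aNiceLoop stop f (base * 10)))

def preferred_sequence (start : Int) (stop : Int) (style : String) : List Int :=
  if start > stop then []
  else if style = "binary" then
    start :: aBinLoop stop ((stop - start).toNat + 1) start
  else if style = "nice" then
    start :: aNiceLoop stop ((stop - start).toNat + 1) start
  else []  -- A raises UnboundLocalError here (unraised ValueError); excluded by Pre_

-- ===== PORT B =====
-- while start * p <= stop: append the (1,2,5)·p multiples that are ≤ stop; p *= 10
-- (fuel only makes the loop total; provably never exhausted on Pre_ inputs).
def bNiceLoop (start : Int) (stop : Int) (fuel : Nat) (p : Int) : List Int :=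
  match fuel with
  | 0 => []
  | f + 1 =>
    if start * p ≤ stop then
      (([1, 2, 5] : List Int).filterMap (fun m =>
        let v := start * m * p
        if v ≤ stop then some v else none)) ++ bNiceLoop start stop f (p * 10)
    else []

def preferred_sequence_alt (start : Int) (stop : Int) (style : String) : List Int :=
  if start > stop then []
  else if style = "binary" then
    let q := PySem.Int.floordiv stop start
    (List.range (PySem.Int.bitLength q)).map (fun i : Nat => start <<< i)
  else if style = "nice" then
    bNiceLoop start stop (stop.toNat + 1) 1
  else []  -- Source B raises ValueError here; excluded by Pre_

-- ===== PRECONDITION & SPEC =====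
-- Pre_ excludes exactly the inputs where A never returns: with start ≤ stop, an invalid
-- style raises UnboundLocalError, and start ≤ 0 makes the progression non-increasing so
-- A's while-loop never breaks (infinite loop).
def Pre_preferred_sequence (start : Int) (stop : Int) (style : String) : Prop :=
  start > stop ∨ (1 ≤ start ∧ (style = "binary" ∨ style = "nice"))
instance (start : Int) (stop : Int) (style : String) : Decidable (Pre_preferred_sequence start stop style) := by
  unfold Pre_preferred_sequence; infer_instance

def pvWitness_preferred_sequence : Int × Int × String := (5, 100, "nice")

def Spec_preferred_sequence (start : Int) (stop : Int) (style : String) (out : List Int) : Prop := out = preferred_sequence_alt start stop style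
instance (start : Int) (stop : Int) (style : String) (out : List Int) : Decidable (Spec_preferred_sequence start stop style out) := by unfold Spec_preferred_sequence; infer_instance

-- ===== CLAIM (what is proved, stated in full; the proofs are below) =====
def Claim_equal_preferred_sequence : Prop := ∀ (start : Int) (stop : Int) (style : String), Dom_preferred_sequence start stop style → Pre_preferred_sequence start stop style → Spec_preferred_sequence start stop style (preferred_sequence start stop style)

-- ===== LEMMAS AND PROOFS =====

-- floor division composes: (stop // v) // 2 = stop // (2v) for 0 < v.
lemma floordiv_floordiv_two (stop v : Int) (hv : 0 < v) :
    PySem.Int.floordiv (PySem.Int.floordiv stop v) 2 = PySem.Int.floordiv stop (v * 2) := by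
  have h2 : (0:Int) < 2 := by norm_num
  have hv2 : (0:Int) < v * 2 := by positivity
  rw [PySem.Int.floordiv_eq_ediv_of_pos (h := hv), PySem.Int.floordiv_eq_ediv_of_pos (h := h2),
      PySem.Int.floordiv_eq_ediv_of_pos (h := hv2), Int.ediv_ediv_eq_ediv_mul]
  exact hv.le

lemma floordiv_pos_of_le (stop v : Int) (hv : 0 < v) (hle : v ≤ stop) :
    0 < PySem.Int.floordiv stop v := by
  have h := (PySem.Int.le_floordiv_iff_mul_le (a := stop) (b := v) (q := 1) hv).2
  simp at h
  exact lt_of_lt_of_le Int.zero_lt_one (h hle)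

lemma bitLength_step (stop v : Int) (hv : 1 ≤ v) (h2 : v * 2 ≤ stop) :
    PySem.Int.bitLength (PySem.Int.floordiv stop v)
      = PySem.Int.bitLength (PySem.Int.floordiv stop (v * 2)) + 1 := by
  have hpos : 0 < PySem.Int.floordiv stop v :=
    floordiv_pos_of_le stop v (by omega) (by nlinarith)
  rw [PySem.Int.bitLength_of_pos (h := hpos), floordiv_floordiv_two stop v (by omega)]

lemma bitLength_last (stop v : Int) (hv : 1 ≤ v) (hle : v ≤ stop) (hlt : stop < v * 2) :
    PySem.Int.bitLength (PySem.Int.floordiv stop v) = 1 := by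
  have hq : PySem.Int.floordiv stop v = 1 := by
    rw [PySem.Int.floordiv_eq_iff_of_pos (by omega)]
    constructor <;> nlinarith
  rw [hq]; decide

-- binary: A's consumed generator equals B's closed-form map, for any sufficient fuel.
lemma bin_eq (stop : Int) : ∀ (fuel : Nat) (v : Int), 1 ≤ v → v ≤ stop → stop ≤ v + fuel →
    v :: aBinLoop stop fuel v
      = (List.range (PySem.Int.bitLength (PySem.Int.floordiv stop v))).map
          (fun i : Nat => v <<< i) := by
  intro fuel
  induction fuel with
  | zero =>
    intro v h1 h2 h3
    rw [bitLength_last stop v h1 h2 (by omega)]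
    simp [aBinLoop, Int.shiftLeft_eq]
  | succ f ih =>
    intro v h1 h2 h3
    by_cases hc : v * 2 > stop
    · rw [bitLength_last stop v h1 h2 hc]
      simp [aBinLoop, hc, Int.shiftLeft_eq]
    · push_neg at hc
      rw [bitLength_step stop v h1 hc, List.range_succ_eq_map, List.map_cons, List.map_map]
      have ihh := ih (v * 2) (by omega) hc (by omega)
      show v :: aBinLoop stop (f + 1) v = _
      simp only [aBinLoop]
      rw [if_neg (by omega)]
      congr 1
      · simp [Int.shiftLeft_eq]
      · rw [ihh]
        apply List.map_congr_left
        intro i _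
        simp [Int.shiftLeft_eq, Function.comp, pow_succ]
        ring

lemma bNice_nil (start stop : Int) (g : Nat) (p : Int) (h : ¬ start * p ≤ stop) :
    bNiceLoop start stop g p = [] := by
  cases g <;> simp only [bNiceLoop] <;> try rw [if_neg h]

-- nice: A's consumed generator equals B's per-decade loop, for any sufficient fuels.
lemma nice_eq (start stop : Int) : ∀ (f1 f2 : Nat) (p b : Int), 1 ≤ b → b = start * p →
    b ≤ stop → stop < b * 10 ^ f1 → stop < b * 10 ^ f2 →
    b :: aNiceLoop stop f1 b = bNiceLoop start stop f2 p := by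
  intro f1
  induction f1 with
  | zero =>
    intro f2 p b h1 hb h2 h3 h4
    simp at h3; omega
  | succ f ih =>
    intro f2 p b h1 hb h2 h3 h4
    match f2 with
    | 0 => simp at h4; omega
    | g + 1 =>
      have e1 : start * 1 * p = b := by rw [hb]; ring
      have e2 : start * 2 * p = b * 2 := by rw [hb]; ring
      have e5 : start * 5 * p = b * 5 := by rw [hb]; ring
      have e10 : ¬ (b * 10 ≤ stop) → ¬ start * (p * 10) ≤ stop := by
        intro h; rw [show start * (p * 10) = b * 10 by rw [hb]; ring]; exact h
      simp only [bNiceLoop, aNiceLoop, List.filterMap_cons, List.filterMap_nil, ← hb, e1, e2, e5]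
      rw [if_pos h2, if_pos h2]
      by_cases c2 : b * 2 > stop
      · have c5 : ¬ (b * 5 ≤ stop) := by nlinarith
        have c10 : ¬ (b * 10 ≤ stop) := by nlinarith
        rw [if_pos c2, if_neg (by omega : ¬ b * 2 ≤ stop), if_neg c5,
            bNice_nil start stop g (p * 10) (e10 c10)]
        simp
      · push_neg at c2
        by_cases c5 : b * 5 > stop
        · have c10 : ¬ (b * 10 ≤ stop) := by nlinarith
          rw [if_neg (by omega), if_pos c5, if_pos c2, if_neg (by omega : ¬ b * 5 ≤ stop),
              bNice_nil start stop g (p * 10) (e10 c10)]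
          simp
        · push_neg at c5
          by_cases c10 : b * 10 > stop
          · rw [if_neg (by omega), if_neg (by omega), if_pos c10, if_pos c2, if_pos c5,
                bNice_nil start stop g (p * 10) (e10 (by omega))]
            simp
          · push_neg at c10
            rw [if_neg (by omega), if_neg (by omega), if_neg (by omega), if_pos c2, if_pos c5]
            have ihh := ih g (p * 10) (b * 10) (by omega) (by rw [hb]; ring) c10
              (by rw [pow_succ] at h3; nlinarith) (by rw [pow_succ] at h4; nlinarith)
            rw [← ihh]
            simp

lemma self_lt_pow10 (n : Nat) : n < 10 ^ n := by
  calc n < 2 ^ n := Nat.lt_two_pow_self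
  _ ≤ 10 ^ n := Nat.pow_le_pow_left (by norm_num) n

lemma stop_lt_mul_pow10 (start stop : Int) (h1 : 1 ≤ start) (n : Nat)
    (hn : stop - start < n) : stop < start * 10 ^ n := by
  have h2 : (n : Int) < 10 ^ n := by exact_mod_cast self_lt_pow10 n
  have h3 : (1 : Int) ≤ 10 ^ n := one_le_pow₀ (by norm_num)
  nlinarith [mul_nonneg (sub_nonneg.2 h1) (sub_nonneg.2 h3)]

-- ===== VERDICT (by name: the statement is the Claim_ definition above) =====
theorem preferred_sequence_spec : Claim_equal_preferred_sequence := by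
  intro start stop style _ hpre
  unfold Spec_preferred_sequence preferred_sequence preferred_sequence_alt
  by_cases hgt : start > stop
  · rw [if_pos hgt, if_pos hgt]
  · rw [if_neg hgt, if_neg hgt]
    push_neg at hgt
    have h1 : 1 ≤ start := by
      rcases hpre with h | ⟨h, _⟩; · omega
      · exact h
    by_cases hb : style = "binary"
    · rw [if_pos hb, if_pos hb]
      exact bin_eq stop ((stop - start).toNat + 1) start h1 hgt (by omega)
    · rw [if_neg hb, if_neg hb]
      have hn : style = "nice" := by
        rcases hpre with h | ⟨_, h | h⟩
        · omega
        · exact absurd h hb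
        · exact h
      rw [if_pos hn, if_pos hn]
      exact (nice_eq start stop ((stop - start).toNat + 1) (stop.toNat + 1) 1 start h1
        (by ring) hgt
        (stop_lt_mul_pow10 start stop h1 _ (by omega))
        (stop_lt_mul_pow10 start stop h1 _ (by omega)))
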